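-- pv_equiv track=rewrite | github.com/whwatkinson/maze | walls/mk1/simple_wall.py | get_wall_coords
-- ===== SOURCE A (Python) =====
-- from typing import Tuple, List
--
-- def get_wall_coords(
--         vertical: bool, length: int, x: int, y: int
-- ) -> List[Tuple[int, int]]:
--     """
--     As it says on the tin
--     :param vertical: Is the wall vertical
--     :param length: The length of the wall
--     :param x: The x coordinate
--     :param y: The y coordinate
--     :return: The coordinates of the wall
--     """
--
--     wall_coords = []
--
--     for _ in range(length):
--         wall_coords.append((x, y))
--         if vertical:
--             x += 1
--         else:
--             y += 1
--
--     return wall_coords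
-- ===== SOURCE B (Python) =====
-- from typing import Tuple, List
--
-- def get_wall_coords(
--         vertical: bool, length: int, x: int, y: int
-- ) -> List[Tuple[int, int]]:
--     # Divide and conquer: build the first half of the wall, then the second
--     # half translated by half along the wall's axis, and concatenate.
--     if length <= 0:
--         return []
--     if length == 1:
--         return [(x, y)]
--     half = length // 2
--     first = get_wall_coords(vertical, half, x, y)
--     if vertical:
--         rest = get_wall_coords(vertical, length - half, x + half, y)
--     else:
--         rest = get_wall_coords(vertical, length - half, x, y + half)
--     return first + rest
-- ===== Notes on version B (the rewrite author's own statement) =====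
-- stated objective: alternative
-- what changed: Replaces A's single pass that threads a mutated running x/y with a divide-and-conquer recursion: the wall is built as the first half concatenated with the second half translated by half along its axis.
import Mathlib
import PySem

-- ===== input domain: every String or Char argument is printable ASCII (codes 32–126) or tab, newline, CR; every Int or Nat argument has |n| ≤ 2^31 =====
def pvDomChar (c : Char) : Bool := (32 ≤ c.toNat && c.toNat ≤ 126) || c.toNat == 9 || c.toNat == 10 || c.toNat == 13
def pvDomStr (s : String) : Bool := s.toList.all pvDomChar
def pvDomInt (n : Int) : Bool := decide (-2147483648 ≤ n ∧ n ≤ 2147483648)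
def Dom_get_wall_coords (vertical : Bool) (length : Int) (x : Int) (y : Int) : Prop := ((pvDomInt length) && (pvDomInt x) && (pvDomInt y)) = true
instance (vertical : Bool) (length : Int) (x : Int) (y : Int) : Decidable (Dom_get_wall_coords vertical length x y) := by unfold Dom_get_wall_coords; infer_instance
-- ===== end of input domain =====

-- B replaces A's single pass threading a mutated running x/y with a divide-and-conquer
-- recursion: first half ++ second half translated by half along the axis (objective: alternative).

-- ===== PORT A =====
-- for _ in range(length): append (x, y); then bump x (vertical) or y (horizontal)
def get_wall_coords (vertical : Bool) (length : Int) (x : Int) (y : Int) : List (Int × Int) :=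
  let st := (PySem.List.pyRange 0 length 1).foldl
    (fun (st : Int × Int × List (Int × Int)) _ =>
      let (x, y, wall_coords) := st
      let wall_coords := wall_coords ++ [(x, y)]
      if vertical then (x + 1, y, wall_coords) else (x, y + 1, wall_coords))
    (x, y, [])
  st.2.2

-- ===== PORT B =====
def get_wall_coords_alt (vertical : Bool) (length : Int) (x : Int) (y : Int) : List (Int × Int) :=
  if _h0 : length ≤ 0 then []
  else if _h1 : length = 1 then [(x, y)]
  else
    let half := PySem.Int.floordiv length 2
    let first := get_wall_coords_alt vertical half x y
    let rest := if vertical then get_wall_coords_alt vertical (length - half) (x + half) y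
                else get_wall_coords_alt vertical (length - half) x (y + half)
    first ++ rest
termination_by length.toNat
decreasing_by
  all_goals
    have h2 : PySem.Int.floordiv length 2 = length / 2 :=
      PySem.Int.floordiv_eq_ediv_of_pos (by omega)
    omega

-- ===== PRECONDITION & SPEC =====
def Spec_get_wall_coords (vertical : Bool) (length : Int) (x : Int) (y : Int) (out : List (Int × Int)) : Prop := out = get_wall_coords_alt vertical length x y
instance (vertical : Bool) (length : Int) (x : Int) (y : Int) (out : List (Int × Int)) : Decidable (Spec_get_wall_coords vertical length x y out) := by unfold Spec_get_wall_coords; infer_instance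

-- ===== CLAIM =====
def Claim_equal_get_wall_coords : Prop := ∀ (vertical : Bool) (length : Int) (x : Int) (y : Int), Dom_get_wall_coords vertical length x y → Spec_get_wall_coords vertical length x y (get_wall_coords vertical length x y)

-- ===== LEMMAS AND PROOFS =====

-- the common closed form both ports are reduced to
def pvWallSpec (vertical : Bool) (n : Nat) (x y : Int) : List (Int × Int) :=
  (List.range n).map (fun k => if vertical then (x + k, y) else (x, y + k))

-- The loop body of A's port, named for the lemmas below.
def pvStep (vertical : Bool) (st : Int × Int × List (Int × Int)) : Int × Int × List (Int × Int) :=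
  let (x, y, wall_coords) := st
  let wall_coords := wall_coords ++ [(x, y)]
  if vertical then (x + 1, y, wall_coords) else (x, y + 1, wall_coords)

theorem pvFlatMap_singleton {α β : Type} (f : α → β) (l : List α) :
    l.flatMap (fun a => [f a]) = l.map f := by
  induction l <;> simp [*]

theorem pvFold_characterize (vertical : Bool) :
    ∀ (L : List Int) (x y : Int) (acc : List (Int × Int)),
      (L.foldl (fun st _ => pvStep vertical st) (x, y, acc)).2.2
        = acc ++ pvWallSpec vertical L.length x y := by
  intro L
  induction L with
  | nil => intro x y acc; simp [pvWallSpec]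
  | cons a L ih =>
    intro x y acc
    rw [List.foldl_cons]
    cases vertical with
    | false =>
      have hstep : pvStep false (x, y, acc) = (x, y + 1, acc ++ [(x, y)]) := by
        simp [pvStep]
      rw [hstep, ih]
      simp [pvWallSpec, pvFlatMap_singleton, List.range_succ_eq_map, List.map_map,
        Function.comp_def]
      intro k _
      ring
    | true =>
      have hstep : pvStep true (x, y, acc) = (x + 1, y, acc ++ [(x, y)]) := by
        simp [pvStep]
      rw [hstep, ih]
      simp [pvWallSpec, pvFlatMap_singleton, List.range_succ_eq_map, List.map_map,
        Function.comp_def]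
      intro k _
      ring

-- shifting the start coordinate of the spec by h along the axis
theorem pvWallSpec_shift (vertical : Bool) (m h : Nat) (x y : Int) :
    (if vertical then pvWallSpec vertical m (x + (h : Int)) y
     else pvWallSpec vertical m x (y + (h : Int)))
      = (List.range m).map (fun k => if vertical then (x + ((h + k : Nat) : Int), y)
                                     else (x, y + ((h + k : Nat) : Int))) := by
  cases vertical <;>
    simp [pvWallSpec, pvFlatMap_singleton, List.map_map, Function.comp_def] <;>
    (try (intro k _; push_cast; ring)) <;> (try (intro k _; ring))

-- splitting the spec at h
theorem pvWallSpec_split (vertical : Bool) (h m : Nat) (x y : Int) :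
    pvWallSpec vertical (h + m) x y
      = pvWallSpec vertical h x y ++
        (if vertical then pvWallSpec vertical m (x + (h : Int)) y
         else pvWallSpec vertical m x (y + (h : Int))) := by
  rw [pvWallSpec_shift]
  cases vertical <;>
    simp [pvWallSpec, pvFlatMap_singleton, List.range_add, List.map_map,
      Function.comp_def] <;>
    (try (intro k _; push_cast; ring))

theorem pvAlt_characterize (vertical : Bool) :
    ∀ (n : Nat) (length : Int), length.toNat = n → ∀ (x y : Int),
      get_wall_coords_alt vertical length x y = pvWallSpec vertical n x y := by
  intro n
  induction n using Nat.strong_induction_on with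
  | _ n ih =>
    intro length hlen x y
    rw [get_wall_coords_alt]
    split_ifs with h0 h1 hv
    · have : n = 0 := by omega
      simp [this, pvWallSpec]
    · have : n = 1 := by omega
      subst h1
      simp [this, pvWallSpec]
    · -- vertical = true
      subst hv
      have hpos : 2 ≤ length := by omega
      have h2 : PySem.Int.floordiv length 2 = length / 2 :=
        PySem.Int.floordiv_eq_ediv_of_pos (by omega)
      set half := PySem.Int.floordiv length 2 with hhalf
      have hh1 : half.toNat < n := by omega
      have hh2 : (length - half).toNat < n := by omega
      have hsum : half.toNat + (length - half).toNat = n := by omega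
      have hcast : ((half.toNat : Nat) : Int) = half := by omega
      have e1 := ih half.toNat hh1 half rfl x y
      have e2 := ih (length - half).toNat hh2 (length - half) rfl (x + half) y
      simp only [e1, e2]
      rw [← hsum, pvWallSpec_split]
      simp [hcast]
    · -- vertical = false
      have hv' : vertical = false := by cases vertical <;> simp_all
      subst hv'
      have hpos : 2 ≤ length := by omega
      have h2 : PySem.Int.floordiv length 2 = length / 2 :=
        PySem.Int.floordiv_eq_ediv_of_pos (by omega)
      set half := PySem.Int.floordiv length 2 with hhalf
      have hh1 : half.toNat < n := by omega
      have hh2 : (length - half).toNat < n := by omega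
      have hsum : half.toNat + (length - half).toNat = n := by omega
      have hcast : ((half.toNat : Nat) : Int) = half := by omega
      have e1 := ih half.toNat hh1 half rfl x y
      have e2 := ih (length - half).toNat hh2 (length - half) rfl x (y + half)
      simp only [e1, e2]
      rw [← hsum, pvWallSpec_split]
      simp [hcast]

-- ===== VERDICT =====
theorem get_wall_coords_spec : Claim_equal_get_wall_coords := by
  intro vertical length x y _
  unfold Spec_get_wall_coords get_wall_coords
  have h := pvFold_characterize vertical (PySem.List.pyRange 0 length 1) x y []
  simp only [pvStep] at h
  rw [h, PySem.List.pyRange_one]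
  rw [pvAlt_characterize vertical length.toNat length rfl x y]
  simp
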